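-- pv_equiv track=rewrite | github.com/camargodev/programming-challenges | hackerrank/1-month-prep/week-4/hackerland-radio-transmitters.py | hackerland_radio_transmitters
-- ===== SOURCE A (Python) =====
-- def hackerland_radio_transmitters(houses, antenna_range):
--     houses.sort()
--     house_set = set(houses)
--     next_uncovered_house = min(houses)
--     last_house = max(houses)
--     transmitters_count = 0
--
--     while next_uncovered_house <= last_house:
--         max_placement_house = next_uncovered_house + antenna_range
--         while max_placement_house not in house_set:
--             max_placement_house -= 1
--
--         transmitters_count += 1
--         next_uncovered_house = max_placement_house + antenna_range + 1
--         while next_uncovered_house <= last_house and next_uncovered_house not in house_set: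
--             next_uncovered_house += 1
--
--     return transmitters_count
-- ===== SOURCE B (Python) =====
-- def hackerland_radio_transmitters(houses, antenna_range):
--     hs = sorted(set(houses))
--     n = len(hs)
--     count = 0
--     i = 0
--     while i < n:
--         count += 1
--         limit = hs[i] + antenna_range
--         while i + 1 < n and hs[i + 1] <= limit:
--             i += 1
--         cover = hs[i] + antenna_range
--         while i < n and hs[i] <= cover:
--             i += 1
--     return count
-- ===== Notes on version B (the rewrite author's own statement) =====
-- stated objective: alternative
-- what changed: A scans integer coordinates one by one (a set-membership test on every value between houses, cost growing with the coordinate span); B sorts the distinct houses once and moves an index pointer over that list, so each greedy step jumps directly from house to house (O(n log n) regardless of the coordinate span, but not measurably faster on the dense benchmark inputs).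
import Mathlib
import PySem

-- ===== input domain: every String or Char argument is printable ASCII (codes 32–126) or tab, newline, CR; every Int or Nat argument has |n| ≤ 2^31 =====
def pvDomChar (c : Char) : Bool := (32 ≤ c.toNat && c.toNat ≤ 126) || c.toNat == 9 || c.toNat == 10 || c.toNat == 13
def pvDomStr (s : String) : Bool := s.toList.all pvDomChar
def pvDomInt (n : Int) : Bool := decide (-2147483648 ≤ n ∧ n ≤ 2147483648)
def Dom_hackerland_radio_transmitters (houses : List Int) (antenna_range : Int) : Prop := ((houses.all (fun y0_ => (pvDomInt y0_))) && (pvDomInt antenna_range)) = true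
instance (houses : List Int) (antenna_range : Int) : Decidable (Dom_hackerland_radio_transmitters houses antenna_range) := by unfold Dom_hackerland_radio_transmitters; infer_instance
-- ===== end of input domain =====

-- B replaces A's coordinate-by-coordinate scanning (a set-membership test on every
-- integer value between houses) by index jumps over the sorted list of distinct houses
-- (an alternative algorithm whose work is independent of the coordinate span).
-- NOTE: Python A sorts `houses` in place (caller-visible mutation); B does not mutate it.
-- The equivalence proved here is about the RETURN value only.


-- ===== PORT A =====
-- `while max_placement_house not in house_set: max_placement_house -= 1`.
-- Fuel makes the scan total: with antenna_range ≥ 0 the scan always succeeds within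
-- antenna_range+1 steps (the current uncovered house is a member); `none` corresponds
-- exactly to Python looping forever (antenna_range < 0), which Pre_ excludes.
def pvDownScan (s : List Int) (m : Int) : Nat → Option Int
  | 0 => none
  | fuel + 1 => if s.contains m then some m else pvDownScan s (m - 1) fuel

-- `while next <= last and next not in house_set: next += 1`; this loop always
-- terminates in Python after at most last - next + 1 steps, which the fuel covers.
def pvUpScan (s : List Int) (last : Int) (m : Int) : Nat → Int
  | 0 => m
  | fuel + 1 => if m ≤ last ∧ s.contains m = false then pvUpScan s last (m + 1) fuel else m

-- the outer `while next_uncovered_house <= last_house` loop; each Python iteration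
-- strictly advances past at least one distinct house, so fuel = (#houses)+1 suffices
-- on every input Pre_ admits.
def pvALoop (s : List Int) (r last : Int) : Nat → Int → Int → Int
  | 0, _, count => count
  | fuel + 1, next, count =>
    if next ≤ last then
      match pvDownScan s (next + r) (r.toNat + 1) with
      | none => count   -- Python diverges here (antenna_range < 0): outside Pre_
      | some p => pvALoop s r last fuel (pvUpScan s last (p + r + 1) ((last - (p + r + 1)).toNat + 1)) (count + 1)
    else count

def hackerland_radio_transmitters (houses : List Int) (antenna_range : Int) : Int :=
  let sortedHouses := PySem.List.sorted houses (fun x => x) false   -- houses.sort()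
  let houseSet := PySem.Set.ofList sortedHouses                     -- set(houses)
  match PySem.List.min? sortedHouses (fun x => x),                  -- min(houses)
        PySem.List.max? sortedHouses (fun x => x) with              -- max(houses)
  | some mn, some mx => pvALoop houseSet antenna_range mx (sortedHouses.length + 1) mn 0
  | _, _ => 0   -- min([]) raises ValueError: outside Pre_

-- ===== PORT B =====
-- `while i + 1 < n and hs[i + 1] <= limit: i += 1` (indices are always in range at the
-- access, so getD is exact there)
def pvAdv1 (hs : List Int) (limit : Int) (i : Nat) : Nat :=
  if i + 1 < hs.length ∧ hs.getD (i + 1) 0 ≤ limit then pvAdv1 hs limit (i + 1) else i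
termination_by hs.length - i
decreasing_by omega

-- `while i < n and hs[i] <= cover: i += 1`
def pvAdv2 (hs : List Int) (cover : Int) (i : Nat) : Nat :=
  if i < hs.length ∧ hs.getD i 0 ≤ cover then pvAdv2 hs cover (i + 1) else i
termination_by hs.length - i
decreasing_by omega

-- the outer `while i < n` loop of B; with antenna_range ≥ 0 every iteration advances
-- i by at least one, so fuel = n+1 suffices on every input Pre_ admits (fuel running
-- out corresponds to Python B diverging, antenna_range < 0, outside Pre_).
def pvBLoop (hs : List Int) (r : Int) : Nat → Nat → Int → Int
  | 0, _, count => count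
  | fuel + 1, i, count =>
    if i < hs.length then
      let j := pvAdv1 hs (hs.getD i 0 + r) i
      pvBLoop hs r fuel (pvAdv2 hs (hs.getD j 0 + r) j) (count + 1)
    else count

def hackerland_radio_transmitters_alt (houses : List Int) (antenna_range : Int) : Int :=
  let hs := PySem.List.sorted (PySem.Set.ofList houses) (fun x => x) false  -- sorted(set(houses))
  pvBLoop hs antenna_range (hs.length + 1) 0 0

-- ===== PRECONDITION & SPEC =====
-- Pre_ excludes only inputs on which A does not return: min([]) raises ValueError on
-- an empty list, and with antenna_range < 0 A's downward scan loops forever.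
def Pre_hackerland_radio_transmitters (houses : List Int) (antenna_range : Int) : Prop :=
  houses ≠ [] ∧ 0 ≤ antenna_range
instance (houses : List Int) (antenna_range : Int) : Decidable (Pre_hackerland_radio_transmitters houses antenna_range) := by unfold Pre_hackerland_radio_transmitters; infer_instance

def pvWitness_hackerland_radio_transmitters : List Int × Int := ([1, 2, 3, 4, 5, 7, 11], 1)

def Spec_hackerland_radio_transmitters (houses : List Int) (antenna_range : Int) (out : Int) : Prop := out = hackerland_radio_transmitters_alt houses antenna_range
instance (houses : List Int) (antenna_range : Int) (out : Int) : Decidable (Spec_hackerland_radio_transmitters houses antenna_range out) := by unfold Spec_hackerland_radio_transmitters; infer_instance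

-- ===== CLAIM (what is proved, stated in full; the proofs are below) =====
def Claim_equal_hackerland_radio_transmitters : Prop := ∀ (houses : List Int) (antenna_range : Int), Dom_hackerland_radio_transmitters houses antenna_range → Pre_hackerland_radio_transmitters houses antenna_range → Spec_hackerland_radio_transmitters houses antenna_range (hackerland_radio_transmitters houses antenna_range)

-- ===== LEMMAS AND PROOFS =====

-- Reference greedy on the sorted distinct list: place the transmitter at the last
-- house within reach of the first uncovered one, drop everything it covers, recurse.
def pvLastLE (b : Int) (cur : Int) : List Int → Int
  | [] => cur
  | y :: ys => if y ≤ b then pvLastLE b y ys else cur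

def pvGreedy (r : Int) : List Int → Int
  | [] => 0
  | x :: rest =>
      1 + pvGreedy r (rest.dropWhile (fun h => decide (h ≤ pvLastLE (x + r) x rest + r)))
termination_by l => l.length
decreasing_by
  simp only [List.length_cons]
  exact Nat.lt_succ_of_le (List.length_dropWhile_le _ _)

-- pvLastLE facts
lemma pvLastLE_mem (b cur : Int) (l : List Int) : pvLastLE b cur l = cur ∨ pvLastLE b cur l ∈ l := by
  induction l generalizing cur with
  | nil => left; rfl
  | cons y ys ih =>
    simp only [pvLastLE]
    split
    · rcases ih y with h | h
      · right; simp [h]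
      · right; simp [h]
    · left; rfl

lemma pvLastLE_le (b cur : Int) (l : List Int) (h : cur ≤ b) : pvLastLE b cur l ≤ b := by
  induction l generalizing cur with
  | nil => exact h
  | cons y ys ih =>
    simp only [pvLastLE]
    split
    · exact ih y ‹y ≤ b›
    · exact h

lemma pvLastLE_ge (b cur : Int) (l : List Int) (hs : (cur :: l).Pairwise (· ≤ ·)) :
    cur ≤ pvLastLE b cur l := by
  induction l generalizing cur with
  | nil => exact le_refl _
  | cons y ys ih =>
    simp only [pvLastLE]
    split
    · have h1 : cur ≤ y := (List.pairwise_cons.1 hs).1 y (by simp)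
      have := ih y (List.pairwise_cons.1 hs).2
      omega
    · exact le_refl _

lemma pvLastLE_greatest (b cur : Int) (l : List Int) (hs : (cur :: l).Pairwise (· ≤ ·)) :
    ∀ y ∈ cur :: l, y ≤ b → y ≤ pvLastLE b cur l := by
  induction l generalizing cur with
  | nil => intro y hy _; simp at hy; simp [hy, pvLastLE]
  | cons z zs ih =>
    intro y hy hyb
    simp only [pvLastLE]
    split
    · rcases List.mem_cons.1 hy with rfl | hy'
      · have h1 : y ≤ z := (List.pairwise_cons.1 hs).1 z (by simp)
        have h2 := pvLastLE_ge b z zs (List.pairwise_cons.1 hs).2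
        omega
      · exact ih z (List.pairwise_cons.1 hs).2 y hy' hyb
    · rcases List.mem_cons.1 hy with rfl | hy'
      · exact le_refl _
      · rcases List.mem_cons.1 hy' with rfl | hy''
        · omega
        · have : z ≤ y := ((List.pairwise_cons.1 (List.pairwise_cons.1 hs).2).1) y hy''
          omega

-- pvDownScan finds the greatest member ≤ m, given enough fuel
lemma pvDownScan_spec (s : List Int) :
    ∀ (fuel : Nat) (m p : Int), p ∈ s → p ≤ m → (∀ y ∈ s, y ≤ m → y ≤ p) →
      (m - p).toNat < fuel → pvDownScan s m fuel = some p := by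
  intro fuel
  induction fuel with
  | zero => intro m p _ _ _ h; omega
  | succ k ih =>
    intro m p hp hpm hgr hfuel
    simp only [pvDownScan]
    by_cases hm : s.contains m
    · have hmem : m ∈ s := List.contains_iff_mem.1 hm
      have : m ≤ p := hgr m hmem (le_refl m)
      have hpm' : p = m := le_antisymm hpm this
      rw [if_pos hm, hpm']
    · have hne : p ≠ m := fun h => hm (List.contains_iff_mem.2 (h ▸ hp))
      rw [if_neg (by simpa using hm)]
      exact ih (m - 1) p hp (by omega) (fun y hy hym => hgr y hy (by omega)) (by omega)

-- pvUpScan finds the least member ≥ m (when it exists and is ≤ last)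
lemma pvUpScan_found (s : List Int) (last : Int) :
    ∀ (fuel : Nat) (m q : Int), q ∈ s → m ≤ q → q ≤ last →
      (∀ y ∈ s, m ≤ y → q ≤ y) → (q - m).toNat < fuel → pvUpScan s last m fuel = q := by
  intro fuel
  induction fuel with
  | zero => intro m q _ _ _ _ h; omega
  | succ k ih =>
    intro m q hq hmq hql hleast hfuel
    simp only [pvUpScan]
    by_cases hm : s.contains m
    · have hmem : m ∈ s := List.contains_iff_mem.1 hm
      have : q ≤ m := hleast m hmem (le_refl m)
      have : q = m := le_antisymm this hmq
      rw [if_neg (fun hc => by simp at hc; exact hc.2 hmem)]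
      omega
    · by_cases hml : m ≤ last
      · rw [if_pos ⟨hml, by simpa using hm⟩]
        have hne : q ≠ m := fun h => hm (List.contains_iff_mem.2 (h ▸ hq))
        exact ih (m + 1) q hq (by omega) hql (fun y hy hym => hleast y hy (by omega)) (by omega)
      · omega
-- pvUpScan runs past last when no member ≥ m exists
lemma pvUpScan_none (s : List Int) (last : Int) :
    ∀ (fuel : Nat) (m : Int), (∀ y ∈ s, y < m) → (last + 1 - m).toNat ≤ fuel →
      last < pvUpScan s last m fuel := by
  intro fuel
  induction fuel with
  | zero => intro m _ h; simp only [pvUpScan]; omega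
  | succ k ih =>
    intro m hall hfuel
    simp only [pvUpScan]
    by_cases hml : m ≤ last
    · have hm : s.contains m = false := by
        by_contra h
        have : m ∈ s := List.contains_iff_mem.1 (by revert h; cases s.contains m <;> simp)
        exact absurd (hall m this) (by omega)
      rw [if_pos ⟨hml, hm⟩]
      exact ih (m + 1) (fun y hy => by have := hall y hy; omega) (by omega)
    · rw [if_neg (fun hc => hml hc.1)]
      omega

-- pvAdv2 lower bound and dropWhile characterisation
lemma pvAdv2_ge (hs : List Int) (cover : Int) (i : Nat) : i ≤ pvAdv2 hs cover i := by
  unfold pvAdv2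
  split
  · have := pvAdv2_ge hs cover (i + 1)
    omega
  · exact le_refl _
termination_by hs.length - i
decreasing_by omega

lemma pvAdv2_drop (hs : List Int) (cover : Int) (i : Nat) :
    hs.drop (pvAdv2 hs cover i) = (hs.drop i).dropWhile (fun h => decide (h ≤ cover)) := by
  unfold pvAdv2
  split
  · next hcond =>
    have hlt : i < hs.length := hcond.1
    have := pvAdv2_drop hs cover (i + 1)
    rw [this, List.drop_eq_getElem_cons hlt, List.dropWhile_cons]
    have : hs[i] = hs.getD i 0 := (List.getD_eq_getElem hs 0 hlt).symm
    rw [if_pos (by simpa [this] using hcond.2)]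
  · next hcond =>
    by_cases hlt : i < hs.length
    · have hgt : ¬ hs.getD i 0 ≤ cover := fun h => hcond ⟨hlt, h⟩
      rw [List.drop_eq_getElem_cons hlt, List.dropWhile_cons]
      have hg : hs[i] = hs.getD i 0 := (List.getD_eq_getElem hs 0 hlt).symm
      rw [if_neg (by simpa [hg] using hgt), ← List.drop_eq_getElem_cons hlt]
    · have h1 : hs.drop i = [] := List.drop_eq_nil_of_le (by omega)
      simp [h1]
termination_by hs.length - i
decreasing_by omega

lemma pvAdv2_enter (hs : List Int) (cover : Int) (i : Nat)
    (h1 : i < hs.length) (h2 : hs.getD i 0 ≤ cover) : i + 1 ≤ pvAdv2 hs cover i := by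
  unfold pvAdv2
  rw [if_pos ⟨h1, h2⟩]
  exact pvAdv2_ge hs cover (i + 1)

-- pvAdv1: bounds and value at the stopping index
lemma pvAdv1_spec (hs : List Int) (limit : Int) (i : Nat) (hi : i < hs.length) :
    i ≤ pvAdv1 hs limit i ∧ pvAdv1 hs limit i < hs.length ∧
      hs.getD (pvAdv1 hs limit i) 0 = pvLastLE limit (hs.getD i 0) (hs.drop (i + 1)) := by
  unfold pvAdv1
  split
  · next hcond =>
    have ih := pvAdv1_spec hs limit (i + 1) hcond.1
    refine ⟨by omega, ih.2.1, ?_⟩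
    rw [ih.2.2, List.drop_eq_getElem_cons hcond.1]
    simp only [pvLastLE]
    have hg : hs.getD (i + 1) 0 = hs[i + 1] := List.getD_eq_getElem hs 0 hcond.1
    rw [if_pos (hg ▸ hcond.2)]; simp only [hg]
  · next hcond =>
    refine ⟨le_refl _, hi, ?_⟩
    by_cases hlt : i + 1 < hs.length
    · have hgt : ¬ hs.getD (i + 1) 0 ≤ limit := fun h => hcond ⟨hlt, h⟩
      rw [List.drop_eq_getElem_cons hlt]
      simp only [pvLastLE]
      have hg : hs.getD (i + 1) 0 = hs[i + 1] := List.getD_eq_getElem hs 0 hlt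
      rw [if_neg (hg ▸ hgt)]
    · have h1 : hs.drop (i + 1) = [] := List.drop_eq_nil_of_le (by omega)
      simp [h1, pvLastLE]
termination_by hs.length - i
decreasing_by omega

-- a dropWhile prefix whose elements all satisfy the predicate can be skipped
lemma dropWhile_append_of_all {p : Int → Bool} {u v : List Int}
    (h : ∀ a ∈ u, p a = true) : (u ++ v).dropWhile p = v.dropWhile p := by
  induction u with
  | nil => rfl
  | cons a u ih =>
    rw [List.cons_append, List.dropWhile_cons, if_pos (h a (by simp))]
    exact ih (fun a ha => h a (by simp [ha]))

-- B's loop computes pvGreedy on the remaining suffix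
lemma pvBLoop_eq_greedy (hs : List Int) (r : Int) (hr : 0 ≤ r)
    (hsort : hs.Pairwise (· ≤ ·)) :
    ∀ (fuel : Nat) (i : Nat) (count : Int), hs.length - i < fuel →
      pvBLoop hs r fuel i count = count + pvGreedy r (hs.drop i) := by
  intro fuel
  induction fuel with
  | zero => intro i count h; omega
  | succ f ih =>
    intro i count hfuel
    simp only [pvBLoop]
    by_cases hi : i < hs.length
    · rw [if_pos hi]
      have hx : hs.getD i 0 = hs[i] := List.getD_eq_getElem hs 0 hi
      set x := hs[i] with hxdef
      have hdropi : hs.drop i = x :: hs.drop (i + 1) := List.drop_eq_getElem_cons hi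
      obtain ⟨hj1, hj2, hj3⟩ := pvAdv1_spec hs (hs.getD i 0 + r) i hi
      set j := pvAdv1 hs (hs.getD i 0 + r) i with hjdef
      have hp : hs.getD j 0 = pvLastLE (x + r) x (hs.drop (i + 1)) := by rw [hj3, hx]
      set p := hs.getD j 0 with hpdef
      -- x ≤ p : monotone indices
      have hpj : p = hs[j] := List.getD_eq_getElem hs 0 hj2
      have hmono : ∀ a b : Nat, a ≤ b → (ha : a < hs.length) → (hb : b < hs.length) → hs[a] ≤ hs[b] := by
        intro a b hab ha hb
        rcases eq_or_lt_of_le hab with h | h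
        · subst h; exact le_refl _
        · exact List.pairwise_iff_getElem.1 hsort a b ha hb h
      have hxp : x ≤ p := by rw [hpj, hxdef]; exact hmono i j hj1 hi hj2
      set k := pvAdv2 hs (p + r) j with hkdef
      have hk : j + 1 ≤ k := pvAdv2_enter hs (p + r) j hj2 (by rw [← hpdef]; omega)
      -- drop k is the dropWhile of the suffix at i
      have hsplit : (hs.drop i).take (j - i) ++ hs.drop j = hs.drop i := by
        have : hs.drop j = (hs.drop i).drop (j - i) := by
          rw [List.drop_drop]; congr 1; omega
        rw [this, List.take_append_drop]
      have htake : ∀ a ∈ (hs.drop i).take (j - i), (fun h => decide (h ≤ p + r)) a = true := by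
        intro a ha
        obtain ⟨t, ht, rfl⟩ := List.mem_iff_getElem.1 ha
        rw [List.getElem_take, List.getElem_drop]
        have hlt : i + t < j := by
          have := ht; simp [List.length_take, List.length_drop] at this; omega
        have hij : i + t < hs.length := by omega
        have : hs[i + t] ≤ hs[j] := hmono (i + t) j (by omega) hij hj2
        rw [← hpj] at this
        simp; omega
      have h2 : (hs.drop i).dropWhile (fun h => decide (h ≤ p + r)) =
          (hs.drop j).dropWhile (fun h => decide (h ≤ p + r)) := by
        rw [← hsplit]; exact dropWhile_append_of_all htake
      have h3 : (hs.drop i).dropWhile (fun h => decide (h ≤ p + r)) =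
          (hs.drop (i + 1)).dropWhile (fun h => decide (h ≤ p + r)) := by
        rw [hdropi, List.dropWhile_cons, if_pos (by simp; omega)]
      have hdropk : hs.drop k = (hs.drop (i + 1)).dropWhile (fun h => decide (h ≤ p + r)) := by
        rw [hkdef, pvAdv2_drop, ← h2, h3]
      -- evaluate pvGreedy one step
      have hgreedy : pvGreedy r (hs.drop i) =
          1 + pvGreedy r ((hs.drop (i + 1)).dropWhile (fun h => decide (h ≤ p + r))) := by
        rw [hdropi]
        simp only [pvGreedy]
        rw [← hp]
      rw [ih k (count + 1) (by omega), hgreedy, ← hdropk]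
      push_cast
      ring
    · rw [if_neg hi]
      have : hs.drop i = [] := List.drop_eq_nil_of_le (by omega)
      simp [this, pvGreedy]

-- A's loop computes pvGreedy on the remaining suffix
lemma pvALoop_eq_greedy (s hs : List Int) (r last : Int) (hr : 0 ≤ r)
    (hmem : ∀ y, y ∈ s ↔ y ∈ hs)
    (hsort : hs.Pairwise (· ≤ ·))
    (hlast : ∀ y ∈ hs, y ≤ last) :
    ∀ (fuel : Nat) (l u : List Int) (next count : Int),
      hs = u ++ l → (∀ y ∈ u, y < next) →
      (∀ x l', l = x :: l' → next = x) → (l = [] → last < next) →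
      l.length < fuel →
      pvALoop s r last fuel next count = count + pvGreedy r l := by
  intro fuel
  induction fuel with
  | zero => intro l u next count _ _ _ _ h; omega
  | succ f ih =>
    intro l u next count huL hu hhead hempty hfuel
    cases l with
    | nil =>
      have hnl := hempty rfl
      simp only [pvALoop]
      rw [if_neg (by omega)]
      simp [pvGreedy]
    | cons x l' =>
      have hnx : next = x := hhead x l' rfl
      rw [hnx] at hu ⊢
      have hxhs : x ∈ hs := by rw [huL]; simp
      have hxlast : x ≤ last := hlast x hxhs
      simp only [pvALoop]
      rw [if_pos hxlast]
      have hsort' : (x :: l').Pairwise (· ≤ ·) := by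
        rw [huL] at hsort; exact (List.pairwise_append.1 hsort).2.1
      set p := pvLastLE (x + r) x l' with hpdef
      have hpmem : p ∈ x :: l' := by
        rcases pvLastLE_mem (x + r) x l' with h | h
        · rw [← hpdef] at h; simp [h]
        · rw [← hpdef] at h; simp [h]
      have hphs : p ∈ hs := by rw [huL]; exact List.mem_append.2 (Or.inr hpmem)
      have hpx : x ≤ p := pvLastLE_ge _ _ _ hsort'
      have hple : p ≤ x + r := pvLastLE_le _ _ _ (by omega)
      have hdown : pvDownScan s (x + r) (r.toNat + 1) = some p := by
        apply pvDownScan_spec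
        · exact (hmem p).2 hphs
        · omega
        · intro y hy hyb
          have hyhs := (hmem y).1 hy
          rw [huL] at hyhs
          rcases List.mem_append.1 hyhs with h | h
          · have := hu y h; omega
          · exact pvLastLE_greatest (x + r) x l' hsort' y h hyb
        · omega
      simp only [hdown]
      set t := l'.takeWhile (fun h => decide (h ≤ p + r)) with htdef
      set l2 := l'.dropWhile (fun h => decide (h ≤ p + r)) with hl2def
      have hl' : l' = t ++ l2 := List.takeWhile_append_dropWhile.symm
      have hcov : ∀ y ∈ x :: t, y ≤ p + r := by
        intro y hy
        rcases List.mem_cons.1 hy with rfl | hy'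
        · omega
        · have := List.mem_takeWhile_imp (htdef ▸ hy')
          simpa using this
      have hgreedy : pvGreedy r (x :: l') = 1 + pvGreedy r l2 := by
        simp only [pvGreedy]
        rw [← hpdef, ← hl2def]
      have hl2len : l2.length ≤ l'.length := hl2def ▸ List.length_dropWhile_le _ _
      cases hl2 : l2 with
      | nil =>
        have hup : last < pvUpScan s last (p + r + 1) ((last - (p + r + 1)).toNat + 1) := by
          apply pvUpScan_none
          · intro y hy
            have hyhs := (hmem y).1 hy
            rw [huL, hl', hl2] at hyhs
            rcases List.mem_append.1 hyhs with h | h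
            · have := hu y h; omega
            · have : y ∈ x :: t := by simpa using h
              have := hcov y this; omega
          · omega
        rw [ih [] hs _ (count + 1) (by simp)
            (fun y hy => lt_of_le_of_lt (hlast y hy) hup)
            (fun a b h => by simp at h) (fun _ => hup) (by simp at hfuel ⊢; omega)]
        rw [hgreedy, hl2]
        simp only [pvGreedy]
        ring
      | cons z l2' =>
        have hdw : l'.dropWhile (fun h => decide (h ≤ p + r)) = z :: l2' := by
          rw [← hl2def, hl2]
        have hzP : ¬ z ≤ p + r := by
          have h0 : ((z :: l2').head (by simp) : Int) = z := rfl
          have h1 := List.head_dropWhile_not (fun h => decide (h ≤ p + r)) (l := l')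
            (by rw [hdw]; simp)
          simp only [hdw] at h1
          simpa using h1
        have hzl' : z ∈ l' := by rw [hl', hl2]; simp
        have hzhs : z ∈ hs := by rw [huL]; simp [hzl']
        have hsl2 : (z :: l2').Pairwise (· ≤ ·) := by
          have h1 : l'.Pairwise (· ≤ ·) := (List.pairwise_cons.1 hsort').2
          have := List.Pairwise.sublist (List.dropWhile_sublist (l := l') (fun h => decide (h ≤ p + r))) h1
          rwa [hdw] at this
        have hup : pvUpScan s last (p + r + 1) ((last - (p + r + 1)).toNat + 1) = z := by
          apply pvUpScan_found
          · exact (hmem z).2 hzhs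
          · omega
          · exact hlast z hzhs
          · intro y hy hym
            have hyhs := (hmem y).1 hy
            rw [huL, hl', hl2] at hyhs
            simp only [List.mem_append, List.mem_cons] at hyhs
            rcases hyhs with h | rfl | h | rfl | h
            · have := hu y h; omega
            · omega
            · have := hcov y (by simp [h]); omega
            · exact le_refl _
            · exact (List.pairwise_cons.1 hsl2).1 y h
          · have := hlast z hzhs; omega
        rw [hup]
        rw [ih (z :: l2') (u ++ x :: t) z (count + 1)
            (by rw [huL, hl', hl2]; simp)
            (by
              intro y hy
              rcases List.mem_append.1 hy with h | h
              · have := hu y h; omega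
              · have := hcov y h; omega)
            (fun a b h => by cases h; rfl)
            (fun h => by simp at h)
            (by
              have hlen : (z :: l2').length ≤ l'.length := by rw [← hl2]; exact hl2len
              simp at hlen hfuel ⊢
              omega)]
        rw [hgreedy, hl2]
        push_cast
        ring

-- ===== VERDICT =====
theorem hackerland_radio_transmitters_spec : Claim_equal_hackerland_radio_transmitters := by
  intro houses r _ hpre
  obtain ⟨hne, hr⟩ := hpre
  unfold Spec_hackerland_radio_transmitters
  simp only [hackerland_radio_transmitters, hackerland_radio_transmitters_alt]
  set sortedHouses := PySem.List.sorted houses (fun x => x) false with hsh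
  set hs := PySem.List.sorted (PySem.Set.ofList houses) (fun x => x) false with hhs
  have hmemS : ∀ y : Int, y ∈ sortedHouses ↔ y ∈ houses := fun y =>
    (PySem.List.sorted_perm houses (fun x => x) false).mem_iff
  have hmemH : ∀ y : Int, y ∈ hs ↔ y ∈ houses := fun y =>
    ((PySem.List.sorted_perm (PySem.Set.ofList houses) (fun x => x) false).mem_iff).trans
      (PySem.Set.mem_ofList houses y)
  have hmem : ∀ y : Int, y ∈ PySem.Set.ofList sortedHouses ↔ y ∈ hs := fun y =>
    (PySem.Set.mem_ofList _ y).trans ((hmemS y).trans (hmemH y).symm)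
  have hlt : hs.Pairwise (· < ·) := PySem.List.sorted_ofList_pairwise_lt houses
  have hsort : hs.Pairwise (· ≤ ·) := hlt.imp le_of_lt
  obtain ⟨a, ha⟩ := List.exists_mem_of_ne_nil houses hne
  have hsne : sortedHouses ≠ [] := fun h => hne (by
    rw [hsh, PySem.List.sorted_eq_nil_iff] at h; exact h)
  have hhsne : hs ≠ [] := fun h => by
    have := (hmemH a).2 ha
    rw [h] at this
    simp at this
  cases hmn : PySem.List.min? sortedHouses (fun x => x) with
  | none => exact absurd ((PySem.List.min?_eq_none_iff _ _).1 hmn) hsne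
  | some mn =>
    cases hmx : PySem.List.max? sortedHouses (fun x => x) with
    | none => exact absurd ((PySem.List.max?_eq_none_iff _ _).1 hmx) hsne
    | some mx =>
      have hlastmx : ∀ y ∈ hs, y ≤ mx := fun y hy =>
        PySem.List.max?_isMax hmx y ((hmemS y).2 ((hmemH y).1 hy))
      have hfuelA : hs.length < sortedHouses.length + 1 := by
        have h1 : hs.length = (PySem.Set.ofList houses).length :=
          (PySem.List.sorted_perm (PySem.Set.ofList houses) (fun x => x) false).length_eq
        have h2 := PySem.Set.length_ofList_le houses
        have h3 : sortedHouses.length = houses.length :=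
          (PySem.List.sorted_perm houses (fun x => x) false).length_eq
        omega
      have hA := pvALoop_eq_greedy (PySem.Set.ofList sortedHouses) hs r mx hr hmem hsort hlastmx
        (sortedHouses.length + 1) hs [] mn 0 (by simp) (by simp)
        (by
          intro x l' hxl
          have hmnhs : mn ∈ hs := (hmemH mn).2 ((hmemS mn).1 (PySem.List.min?_mem hmn))
          have hxs : x ∈ sortedHouses := by
            apply (hmemS x).2; apply (hmemH x).1; rw [hxl]; simp
          have h1 : mn ≤ x := PySem.List.min?_isMin hmn x hxs
          rw [hxl] at hmnhs hlt
          rcases List.mem_cons.1 hmnhs with rfl | h2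
          · rfl
          · have := (List.pairwise_cons.1 hlt).1 mn h2
            omega)
        (fun h => absurd h hhsne) (by omega)
      have hB := pvBLoop_eq_greedy hs r hr hsort (hs.length + 1) 0 0 (by omega)
      simp only []
      rw [hA, hB]
      simp
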